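-- pv_equiv track=rewrite | github.com/rdzumaga/mbi | modules/NW.py | createAlignmentString
-- ===== SOURCE A (Python) =====
-- def createAlignmentString(alignedSeq, alignedSeqRef):
--     '''Construct a special string showing identities, gaps, and mismatches.
--
--     This string is printed between the two aligned sequences and shows the
--     identities (|), gaps (-), and mismatches (:). As the string is constructed,
--     it also counts number of identities, gaps, and mismatches and returns the
--     counts along with the alignment string.
--
--     AAGGATGCCTCAAATCGATCT-TTTTCTTGG-
--     ::||::::::||:|::::::: |:  :||:|   <-- alignment string
--     CTGGTACTTGCAGAGAAGGGGGTA--ATTTGG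
--     '''
--     # Build the string as a list of characters to avoid costly string
--     # concatenation.
--     idents, gaps, mismatches = 0, 0, 0
--     alignmentString = []
--
--     for base1, base2 in zip(alignedSeq, alignedSeqRef):
--         if base1 == base2:
--             alignmentString.append('|')
--             idents += 1
--         elif '-' in (base1, base2):
--             alignmentString.append(' ')
--             gaps += 1
--         else:
--             alignmentString.append(':')
--             mismatches += 1
--
--     return ''.join(alignmentString), idents, gaps, mismatches
-- ===== SOURCE B (Python) =====
-- def createAlignmentString(alignedSeq, alignedSeqRef):
--     # Paint a mutable marker array in staged passes: start with a ':' background,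
--     # overwrite gap positions with ' ', then overwrite identity positions with '|'
--     # (identity wins, so a '-'/'-' pair is still an identity, as in the original).
--     # Mismatches are derived arithmetically as n - idents - gaps.
--     n = min(len(alignedSeq), len(alignedSeqRef))
--     marks = [':'] * n
--     for i in range(n):
--         if '-' in (alignedSeq[i], alignedSeqRef[i]):
--             marks[i] = ' '
--     for i in range(n):
--         if alignedSeq[i] == alignedSeqRef[i]:
--             marks[i] = '|'
--     result = ''.join(marks)
--     idents = result.count('|')
--     gaps = result.count(' ')
--     return result, idents, gaps, n - idents - gaps
-- ===== Notes on version B (the rewrite author's own statement) =====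
-- stated objective: alternative
-- what changed: B paints a mutable marker array in staged overwrite passes (':' background, then gap positions, then identity positions) and derives the mismatch count arithmetically as n - idents - gaps, instead of A's single fused per-pair classification loop maintaining three counters.
import Mathlib
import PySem

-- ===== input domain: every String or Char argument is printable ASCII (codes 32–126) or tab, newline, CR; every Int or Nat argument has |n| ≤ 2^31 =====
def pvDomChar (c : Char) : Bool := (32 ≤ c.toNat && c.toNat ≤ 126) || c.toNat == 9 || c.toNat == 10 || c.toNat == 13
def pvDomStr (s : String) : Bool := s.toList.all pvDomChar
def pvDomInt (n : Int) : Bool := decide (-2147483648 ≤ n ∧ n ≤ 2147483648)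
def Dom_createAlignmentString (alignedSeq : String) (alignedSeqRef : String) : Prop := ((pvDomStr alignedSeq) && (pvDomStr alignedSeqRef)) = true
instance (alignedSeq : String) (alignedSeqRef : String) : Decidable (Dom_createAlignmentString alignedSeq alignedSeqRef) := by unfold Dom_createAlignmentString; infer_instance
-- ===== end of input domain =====

-- B paints a marker array in staged overwrite passes (':' background, then gaps,
-- then identities) and derives mismatches as n - idents - gaps (alternative decomposition).

-- ===== PORT A =====
-- one fused loop: append a marker char and bump the matching counter
def pvStepA (st : List Char × Int × Int × Int) (p : Char × Char) : List Char × Int × Int × Int :=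
  if p.1 == p.2 then (st.1 ++ ['|'], st.2.1 + 1, st.2.2.1, st.2.2.2)
  else if p.1 == '-' || p.2 == '-' then (st.1 ++ [' '], st.2.1, st.2.2.1 + 1, st.2.2.2)
  else (st.1 ++ [':'], st.2.1, st.2.2.1, st.2.2.2 + 1)

def createAlignmentString (alignedSeq : String) (alignedSeqRef : String) : String × Int × Int × Int :=
  let st := (alignedSeq.toList.zip alignedSeqRef.toList).foldl pvStepA ([], 0, 0, 0)
  (String.ofList st.1, st.2.1, st.2.2.1, st.2.2.2)

-- ===== PORT B =====
def createAlignmentString_alt (alignedSeq : String) (alignedSeqRef : String) : String × Int × Int × Int :=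
  let la := alignedSeq.toList
  let lb := alignedSeqRef.toList
  let n := min la.length lb.length
  -- marks = [':'] * n
  let marks0 := List.replicate n ':'
  -- first pass: overwrite gap positions with ' '
  let marks1 := (List.range n).foldl
    (fun m i => if la.getD i ' ' == '-' || lb.getD i ' ' == '-' then m.set i ' ' else m) marks0
  -- second pass: overwrite identity positions with '|'
  let marks2 := (List.range n).foldl
    (fun m i => if la.getD i ' ' == lb.getD i ' ' then m.set i '|' else m) marks1
  let result := String.ofList marks2
  let idents : Int := PySem.Str.count result "|"
  let gaps : Int := PySem.Str.count result " "
  (result, idents, gaps, (n : Int) - idents - gaps)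

-- ===== PRECONDITION & SPEC =====
def Spec_createAlignmentString (alignedSeq : String) (alignedSeqRef : String) (out : String × Int × Int × Int) : Prop := out = createAlignmentString_alt alignedSeq alignedSeqRef
instance (alignedSeq : String) (alignedSeqRef : String) (out : String × Int × Int × Int) : Decidable (Spec_createAlignmentString alignedSeq alignedSeqRef out) := by unfold Spec_createAlignmentString; infer_instance

-- ===== CLAIM (what is proved, stated in full; the proofs are below) =====
def Claim_equal_createAlignmentString : Prop := ∀ (alignedSeq : String) (alignedSeqRef : String), Dom_createAlignmentString alignedSeq alignedSeqRef → Spec_createAlignmentString alignedSeq alignedSeqRef (createAlignmentString alignedSeq alignedSeqRef)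

-- ===== LEMMAS AND PROOFS =====

-- the classification both programs realise, used only in the proofs
def pvMarker (p : Char × Char) : Char :=
  if p.1 == p.2 then '|' else if p.1 == '-' || p.2 == '-' then ' ' else ':'

-- Python's s.count(c) on a single-character pattern is List.count
theorem pv_count_go_single (c : Char) : ∀ (fuel : Nat) (l : List Char) (acc : Nat),
    l.length ≤ fuel → PySem.Chars.count.go [c] fuel l acc = acc + l.count c := by
  intro fuel
  induction fuel with
  | zero =>
    intro l acc h
    have : l = [] := List.eq_nil_of_length_eq_zero (Nat.le_zero.mp h)
    subst this; simp [PySem.Chars.count.go]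
  | succ n ih =>
    intro l acc h
    cases l with
    | nil => simp [PySem.Chars.count.go]
    | cons x t =>
      simp only [PySem.Chars.count.go]
      by_cases hx : x = c
      · subst hx
        have hp : List.isPrefixOf [x] (x :: t) = true := by simp [List.isPrefixOf]
        rw [if_pos hp]
        have hd : List.drop [x].length (x :: t) = t := rfl
        simp only [List.length_cons] at h
        rw [hd, ih t (acc + 1) (by omega)]
        simp
        omega
      · have hp : List.isPrefixOf [c] (x :: t) = false := by
          simp [List.isPrefixOf]
          exact fun hcx => hx hcx.symm
        rw [hp]
        simp only [Bool.false_eq_true, if_false, List.length_cons] at *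
        rw [ih t acc (by omega)]
        simp [hx]

theorem pv_count_single (l : List Char) (c : Char) :
    PySem.Chars.count l [c] = l.count c := by
  simp only [PySem.Chars.count, List.isEmpty_cons, Bool.false_eq_true, if_false]
  simpa using pv_count_go_single c l.length l 0 (le_refl _)

-- A's fused loop computes the marker map together with the three counts of markers
theorem pv_loop_eq (l : List (Char × Char)) : ∀ (acc : List Char) (i g m : Int),
    l.foldl pvStepA (acc, i, g, m) =
      (acc ++ l.map pvMarker,
       i + ((l.map pvMarker).count '|' : Int),
       g + ((l.map pvMarker).count ' ' : Int),
       m + ((l.map pvMarker).count ':' : Int)) := by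
  induction l with
  | nil => intro acc i g m; simp
  | cons p t ih =>
    intro acc i g m
    simp only [List.foldl_cons, List.map_cons, pvStepA, pvMarker]
    by_cases h1 : (p.1 == p.2) = true
    · rw [if_pos h1, if_pos h1, ih]
      simp
      omega
    · rw [if_neg h1, if_neg h1]
      by_cases h2 : (p.1 == '-' || p.2 == '-') = true
      · rw [if_pos h2, if_pos h2, ih]
        simp
        omega
      · rw [if_neg h2, if_neg h2, ih]
        simp
        omega

-- a painting pass preserves the length
theorem pv_paint_length (cond : Nat → Bool) (v : Char) :
    ∀ (L : List Nat) (m : List Char),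
      (L.foldl (fun m i => if cond i then m.set i v else m) m).length = m.length := by
  intro L
  induction L with
  | nil => intro m; rfl
  | cons x t ih => intro m; simp only [List.foldl_cons]; split <;> simp [ih]

-- element of a painting pass over range n
theorem pv_paint_getElem? (cond : Nat → Bool) (v : Char) :
    ∀ (n : Nat) (m : List Char) (j : Nat), j < m.length →
      ((List.range n).foldl (fun m i => if cond i then m.set i v else m) m)[j]? =
        if j < n ∧ cond j = true then some v else m[j]? := by
  intro n
  induction n with
  | zero => intro m j hj; simp
  | succ k ih =>
    intro m j hj
    rw [List.range_succ, List.foldl_append]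
    simp only [List.foldl_cons, List.foldl_nil]
    have hl := pv_paint_length cond v (List.range k) m
    by_cases hc : cond k = true
    · rw [if_pos hc, List.getElem?_set]
      by_cases hk : k = j
      · subst hk
        rw [if_pos rfl, if_pos (by omega), if_pos ⟨by omega, hc⟩]
      · rw [if_neg hk, ih m j hj]
        by_cases hjk : j < k ∧ cond j = true
        · rw [if_pos hjk, if_pos ⟨by omega, hjk.2⟩]
        · rw [if_neg hjk, if_neg]
          intro h
          obtain ⟨h1, h2⟩ := h
          exact hjk ⟨by omega, h2⟩
    · rw [if_neg hc, ih m j hj]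
      by_cases hjk : j < k ∧ cond j = true
      · rw [if_pos hjk, if_pos ⟨by omega, hjk.2⟩]
      · rw [if_neg hjk, if_neg]
        intro h
        obtain ⟨h1, h2⟩ := h
        have hne : j ≠ k := fun he => hc (he ▸ h2)
        exact hjk ⟨by omega, h2⟩

-- the staged painting equals the marker map
theorem pv_paint_eq_map (la lb : List Char) :
    (List.range (min la.length lb.length)).foldl
        (fun m i => if la.getD i ' ' == lb.getD i ' ' then m.set i '|' else m)
      ((List.range (min la.length lb.length)).foldl
        (fun m i => if la.getD i ' ' == '-' || lb.getD i ' ' == '-' then m.set i ' ' else m)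
        (List.replicate (min la.length lb.length) ':')) =
    (la.zip lb).map pvMarker := by
  set n := min la.length lb.length with hn
  have hlen1 : ((List.range n).foldl
      (fun m i => if la.getD i ' ' == '-' || lb.getD i ' ' == '-' then m.set i ' ' else m)
      (List.replicate n ':')).length = n := by
    rw [pv_paint_length]; simp
  apply List.ext_getElem?
  intro j
  by_cases hj : j < n
  · rw [pv_paint_getElem? _ _ n _ j (by rw [hlen1]; exact hj)]
    have hja : j < la.length := by omega
    have hjb : j < lb.length := by omega
    have hzlen : j < (la.zip lb).length := by rw [List.length_zip]; omega
    have hz : ((la.zip lb).map pvMarker)[j]? = some (pvMarker (la[j], lb[j])) := by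
      rw [List.getElem?_map, List.getElem?_eq_getElem hzlen]
      simp [List.getElem_zip]
    have hga : la.getD j ' ' = la[j] := by rw [List.getD_eq_getElem la ' ' hja]
    have hgb : lb.getD j ' ' = lb[j] := by rw [List.getD_eq_getElem lb ' ' hjb]
    rw [hz]
    by_cases he : (la[j] == lb[j]) = true
    · rw [if_pos ⟨hj, by rw [hga, hgb]; exact he⟩]
      simp only [pvMarker]
      rw [if_pos he]
    · rw [if_neg (fun h => he (by rw [← hga, ← hgb]; exact h.2))]
      rw [pv_paint_getElem? _ _ n _ j (by simp [hj])]
      simp only [pvMarker, if_neg he]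
      by_cases hg : (la[j] == '-' || lb[j] == '-') = true
      · rw [if_pos ⟨hj, by rw [hga, hgb]; exact hg⟩, if_pos hg]
      · rw [if_neg (fun h => hg (by rw [← hga, ← hgb]; exact h.2)), if_neg hg]
        rw [List.getElem?_replicate, if_pos hj]
  · have h1 : ((la.zip lb).map pvMarker)[j]? = none := by
      rw [List.getElem?_eq_none]; simp; omega
    have h2len : ((List.range n).foldl
        (fun m i => if la.getD i ' ' == lb.getD i ' ' then m.set i '|' else m)
        ((List.range n).foldl
          (fun m i => if la.getD i ' ' == '-' || lb.getD i ' ' == '-' then m.set i ' ' else m)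
          (List.replicate n ':'))).length = n := by
      rw [pv_paint_length, hlen1]
    rw [h1, List.getElem?_eq_none (by rw [h2len]; omega)]

-- every marker is one of the three symbols, so the counts sum to the length
theorem pv_counts_sum (l : List (Char × Char)) :
    (l.map pvMarker).count '|' + (l.map pvMarker).count ' ' + (l.map pvMarker).count ':' =
      l.length := by
  induction l with
  | nil => rfl
  | cons p t ih =>
    simp only [List.map_cons, List.length_cons, pvMarker]
    split
    · simp; omega
    · split <;> · simp; omega

-- ===== VERDICT (by name: the statement is the Claim_ definition above) =====
theorem createAlignmentString_spec : Claim_equal_createAlignmentString := by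
  intro s r _
  unfold Spec_createAlignmentString createAlignmentString createAlignmentString_alt
  dsimp only
  rw [pv_loop_eq, pv_paint_eq_map]
  have hlen : (s.toList.zip r.toList).length = min s.toList.length r.toList.length :=
    List.length_zip
  have hc : ((s.toList.zip r.toList).map pvMarker).count '|' +
      ((s.toList.zip r.toList).map pvMarker).count ' ' +
      ((s.toList.zip r.toList).map pvMarker).count ':' =
      min s.toList.length r.toList.length := by rw [pv_counts_sum, hlen]
  simp only [PySem.Str.count_eq, String.toList_ofList]
  have h1 : PySem.Chars.count ((s.toList.zip r.toList).map pvMarker) "|".toList =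
      ((s.toList.zip r.toList).map pvMarker).count '|' := pv_count_single _ _
  have h2 : PySem.Chars.count ((s.toList.zip r.toList).map pvMarker) " ".toList =
      ((s.toList.zip r.toList).map pvMarker).count ' ' := pv_count_single _ _
  simp only [h1, h2, Prod.mk.injEq, List.nil_append]
  refine ⟨trivial, by omega, by omega, by push_cast; omega⟩
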